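-- pv_equiv track=rewrite | github.com/fspv/learning | l33tcode/minimum-replacements-to-sort-the-array.py | minimumReplacementBruteForce
-- ===== SOURCE A (Python) =====
-- from typing import List, Tuple
--
-- def minimumReplacementBruteForce(nums: List[int]) -> int:
--     limit = nums[-1]
--     total_splits = 0
--
--     def optimal_split(num: int, limit: int) -> Tuple[int, int]:
--         count = 0
--
--         divisor = limit
--         buffer = 0
--
--         while num % divisor != 0:
--             if divisor - (num % divisor) <= buffer:
--                 num += divisor - (num % divisor)
--                 buffer -= divisor - (num % divisor)
--                 continue
--
--             count += num // divisor
--             num = num % divisor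
--
--             buffer += count
--
--             divisor -= 1
--
--         count += num // divisor
--
--         return (divisor, count - 1)
--
--     for num in reversed(nums):
--         if num <= limit:
--             limit = num
--         else:
--             limit, splits = optimal_split(num, limit)
--             total_splits += splits
--
--     return total_splits
-- ===== SOURCE B (Python) =====
-- from typing import List
--
-- def minimumReplacementBruteForce(nums: List[int]) -> int:
--     limit = nums[-1]
--     splits = 0
--     for num in reversed(nums):
--         if num <= limit:
--             limit = num
--         else:
--             parts = -(-num // limit)  # ceil(num / limit)
--             splits += parts - 1
--             limit = num // parts
--     return splits
-- ===== Notes on version B (the rewrite author's own statement) =====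
-- stated objective: simpler
-- what changed: B replaces A's per-element trial-division while-loop (decrementing a divisor with a buffer until it hits the optimal part size) by a single closed-form ceiling-division step per element: parts = ceil(num/limit), splits += parts-1, limit = num//parts.
-- outside the precondition, e.g. on minimumReplacementBruteForce([13, 13, -1, -4]): A returns -8, B returns -28; on minimumReplacementBruteForce([2, -10]): A returns -1, B raises ZeroDivisionError
import Mathlib
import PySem

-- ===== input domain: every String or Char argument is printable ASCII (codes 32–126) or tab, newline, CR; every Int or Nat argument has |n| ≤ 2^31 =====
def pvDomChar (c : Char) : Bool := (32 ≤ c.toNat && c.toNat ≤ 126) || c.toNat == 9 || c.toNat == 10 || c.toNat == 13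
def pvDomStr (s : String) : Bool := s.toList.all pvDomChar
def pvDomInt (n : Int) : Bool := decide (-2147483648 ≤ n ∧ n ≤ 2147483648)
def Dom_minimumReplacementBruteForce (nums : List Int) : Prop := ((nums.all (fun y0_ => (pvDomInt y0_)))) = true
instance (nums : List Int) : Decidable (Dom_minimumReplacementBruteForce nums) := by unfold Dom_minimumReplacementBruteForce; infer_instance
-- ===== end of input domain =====

-- B replaces A's per-element trial-division while-loop by one closed-form ceiling-division step per
-- element (parts = ceil(num/limit); splits += parts - 1; limit = num // parts): shorter and plainer.

-- ===== PORT A =====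
-- the while-loop of A's inner helper `optimal_split`; `fuel` only makes the recursion total
-- (on Pre_ inputs fuel never runs out — the loop runs at most `limit` iterations)
def loopA (fuel : Nat) (num count divisor buffer : Int) : Int × Int :=
  match fuel with
  | 0 => (divisor, count - 1)
  | f + 1 =>
    if PySem.Int.mod num divisor ≠ 0 then
      if divisor - PySem.Int.mod num divisor ≤ buffer then
        loopA f (num + (divisor - PySem.Int.mod num divisor)) count divisor
          (buffer - (divisor - PySem.Int.mod num divisor))
      else
        loopA f (PySem.Int.mod num divisor)
          (count + PySem.Int.floordiv num divisor) (divisor - 1)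
          (buffer + (count + PySem.Int.floordiv num divisor))
    else (divisor, count + PySem.Int.floordiv num divisor - 1)

-- A's helper `optimal_split(num, limit)`
def optimalSplit (num limit : Int) : Int × Int :=
  loopA (limit.toNat + 2) num 0 limit 0

-- one step of A's `for num in reversed(nums)` loop; state = (limit, total_splits)
def stepA (st : Int × Int) (num : Int) : Int × Int :=
  if num ≤ st.1 then (num, st.2)
  else ((optimalSplit num st.1).1, st.2 + (optimalSplit num st.1).2)

def minimumReplacementBruteForce (nums : List Int) : Int :=
  -- nums[-1]: Python raises IndexError on []; Pre_ excludes it (getD 0 is never used inside Pre_)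
  let limit := (PySem.List.pyGet? nums (-1)).getD 0
  (nums.reverse.foldl stepA (limit, 0)).2

-- ===== PORT B =====
-- one step of B's loop: parts = ceil(num/limit) = -(-num // limit); state = (limit, splits)
def stepB (st : Int × Int) (num : Int) : Int × Int :=
  if num ≤ st.1 then (num, st.2)
  else
    let parts := -(PySem.Int.floordiv (-num) st.1)
    (PySem.Int.floordiv num parts, st.2 + (parts - 1))

def minimumReplacementBruteForce_alt (nums : List Int) : Int :=
  let limit := (PySem.List.pyGet? nums (-1)).getD 0
  (nums.reverse.foldl stepB (limit, 0)).2

-- ===== PRECONDITION & SPEC =====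
-- Pre_ excludes the empty list (A raises IndexError) and lists in which some element smaller than
-- an earlier element is ≤ 0 (a non-positive split target): there A either raises ZeroDivisionError
-- or returns negative "split counts", an artefact of floor division/modulo with non-positive
-- divisors (on a few such inputs A and B coincide by accident, e.g. when the divisor is -1;
-- the problem is stated for positive integers, so no value there is the specified one).
def Pre_minimumReplacementBruteForce (nums : List Int) : Prop :=
  nums ≠ [] ∧ List.Pairwise (fun a b => b < a → 1 ≤ b) nums
instance (nums : List Int) : Decidable (Pre_minimumReplacementBruteForce nums) := by
  unfold Pre_minimumReplacementBruteForce; infer_instance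

def pvWitness_minimumReplacementBruteForce : List Int := [7, 5, 23, 7]

def Spec_minimumReplacementBruteForce (nums : List Int) (out : Int) : Prop := out = minimumReplacementBruteForce_alt nums
instance (nums : List Int) (out : Int) : Decidable (Spec_minimumReplacementBruteForce nums out) := by unfold Spec_minimumReplacementBruteForce; infer_instance

-- ===== CLAIM (what is proved, stated in full; the proofs are below) =====
def Claim_equal_minimumReplacementBruteForce : Prop := ∀ (nums : List Int), Dom_minimumReplacementBruteForce nums → Pre_minimumReplacementBruteForce nums → Spec_minimumReplacementBruteForce nums (minimumReplacementBruteForce nums)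

-- ===== LEMMAS AND PROOFS =====

-- Phase 2 of A's while-loop: after the first iteration the state is (m, c, d, c*(L-d)) with
-- 0 < m ≤ d; the loop just decrements d until d ≤ (c*L+m)/(c+1), then returns ((c*L+m)/(c+1), c).
lemma loopA_phase2 (L c m : Int) (hm : 0 < m) (hc : 1 ≤ c) :
    ∀ (fuel : Nat) (d b : Int), m ≤ d → d ≤ L →
      PySem.Int.floordiv (c * L + m) (c + 1) ≤ d →
      (d - PySem.Int.floordiv (c * L + m) (c + 1)).toNat + 2 ≤ fuel →
      b = c * (L - d) →
      loopA fuel m c d b = (PySem.Int.floordiv (c * L + m) (c + 1), c) := by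
  intro fuel
  induction fuel with
  | zero => intro d b _ _ _ hf _; omega
  | succ f ih =>
    intro d b hmd hdL hDd hf hb
    subst hb
    have hc1 : (0:Int) < c + 1 := by omega
    have hd0 : (0:Int) < d := by omega
    have hD1 : PySem.Int.floordiv (c * L + m) (c + 1) * (c + 1) ≤ c * L + m :=
      (PySem.Int.le_floordiv_iff_mul_le hc1).mp le_rfl
    have hD2 : c * L + m < (PySem.Int.floordiv (c * L + m) (c + 1) + 1) * (c + 1) :=
      (PySem.Int.floordiv_lt_iff_lt_mul hc1).mp (by omega)
    rcases eq_or_lt_of_le hmd with heq | hlt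
    · -- m = d : num % divisor == 0, the loop exits at its entry check
      subst heq
      have hDm : PySem.Int.floordiv (c * L + m) (c + 1) = m := by
        have h1 : m ≤ PySem.Int.floordiv (c * L + m) (c + 1) := by
          rw [PySem.Int.le_floordiv_iff_mul_le hc1]; nlinarith
        omega
      simp only [loopA]
      have hmod : PySem.Int.mod m m = 0 := by
        rw [PySem.Int.mod_eq_emod_of_pos hm]; exact Int.emod_self
      rw [if_neg (by simp [hmod])]
      have hfd : PySem.Int.floordiv m m = 1 := by
        rw [PySem.Int.floordiv_eq_ediv_of_pos hm]; exact Int.ediv_self (by omega)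
      rw [hfd, hDm]
      norm_num
    · -- m < d : the entry check passes (m % d = m ≠ 0)
      have hmodm : PySem.Int.mod m d = m := by
        rw [PySem.Int.mod_eq_emod_of_pos hd0]; exact Int.emod_eq_of_lt (le_of_lt hm) hlt
      simp only [loopA, hmodm]
      rw [if_pos (by omega : m ≠ 0)]
      by_cases hexit : d ≤ PySem.Int.floordiv (c * L + m) (c + 1)
      · -- d = (c*L+m)/(c+1): buffer branch fires, num is padded to d and the loop exits
        have hdD : d = PySem.Int.floordiv (c * L + m) (c + 1) := le_antisymm hexit hDd
        have hdmul : d * (c + 1) ≤ c * L + m := by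
          have := (PySem.Int.le_floordiv_iff_mul_le hc1).mp hexit
          exact this
        rw [if_pos (by nlinarith : d - m ≤ c * (L - d))]
        rw [show m + (d - m) = d from by ring]
        cases f with
        | zero => omega
        | succ f' =>
          simp only [loopA]
          have hmodd : PySem.Int.mod d d = 0 := by
            rw [PySem.Int.mod_eq_emod_of_pos hd0]; exact Int.emod_self
          rw [if_neg (by simp [hmodd])]
          have hfd : PySem.Int.floordiv d d = 1 := by
            rw [PySem.Int.floordiv_eq_ediv_of_pos hd0]; exact Int.ediv_self (by omega)
          rw [hfd, hdD]
          norm_num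
      · -- d > (c*L+m)/(c+1): divisor is decremented, buffer grows by count
        rw [not_le] at hexit
        have hcond : ¬ (d - m ≤ c * (L - d)) := by
          intro h
          have : d ≤ PySem.Int.floordiv (c * L + m) (c + 1) := by
            rw [PySem.Int.le_floordiv_iff_mul_le hc1]; nlinarith
          omega
        rw [if_neg hcond]
        have hfd : PySem.Int.floordiv m d = 0 := by
          rw [PySem.Int.floordiv_eq_ediv_of_pos hd0]
          exact Int.ediv_eq_zero_of_lt (le_of_lt hm) hlt
        rw [hfd]
        have h2 : c + 0 = c := by ring
        rw [h2]
        exact ih (d - 1) _ (by omega) (by omega) (by omega) (by omega) (by ring)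

-- A's optimal_split(num, limit) = (num // p, p - 1) with p = ceil(num/limit), for 1 ≤ limit < num
lemma optimalSplit_eq (N L : Int) (hL : 1 ≤ L) (hN : L < N) :
    optimalSplit N L =
      (PySem.Int.floordiv N (-(PySem.Int.floordiv (-N) L)), -(PySem.Int.floordiv (-N) L) - 1) := by
  have hL0 : (0:Int) < L := by omega
  have hm0 : 0 ≤ PySem.Int.mod N L := PySem.Int.mod_nonneg N hL0
  have hmL : PySem.Int.mod N L < L := PySem.Int.mod_lt N hL0
  have hsum : PySem.Int.floordiv N L * L + PySem.Int.mod N L = N := PySem.Int.floordiv_mul_add_mod N L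
  have hc : 1 ≤ PySem.Int.floordiv N L := by
    rw [PySem.Int.le_floordiv_iff_mul_le hL0]; omega
  obtain ⟨k, hk⟩ : ∃ k, k = L.toNat + 1 := ⟨_, rfl⟩
  show loopA (L.toNat + 1 + 1) N 0 L 0 = _
  rw [← hk]
  by_cases hm : PySem.Int.mod N L = 0
  · -- L divides N: the loop exits immediately with (L, N//L - 1)
    have hceil : -(PySem.Int.floordiv (-N) L) = PySem.Int.floordiv N L :=
      (PySem.Int.neg_floordiv_neg_eq_iff_of_pos hL0).mpr ⟨by nlinarith, by nlinarith⟩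
    simp only [loopA]
    rw [if_neg (by simp [hm])]
    rw [hceil]
    have hdd : PySem.Int.floordiv N (PySem.Int.floordiv N L) = L := by
      rw [PySem.Int.floordiv_eq_iff_of_pos (by omega : (0:Int) < PySem.Int.floordiv N L)]
      constructor <;> nlinarith
    rw [hdd]
    norm_num
  · -- L does not divide N: one real iteration, then phase 2
    have hmpos : 0 < PySem.Int.mod N L := by omega
    have hceil : -(PySem.Int.floordiv (-N) L) = PySem.Int.floordiv N L + 1 :=
      (PySem.Int.neg_floordiv_neg_eq_iff_of_pos hL0).mpr ⟨by nlinarith, by nlinarith⟩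
    simp only [loopA]
    rw [if_pos (hm : PySem.Int.mod N L ≠ 0)]
    rw [if_neg (by omega : ¬ (L - PySem.Int.mod N L ≤ (0:Int)))]
    simp only [zero_add]
    have hD1 : 1 ≤ PySem.Int.floordiv N (PySem.Int.floordiv N L + 1) := by
      rw [PySem.Int.le_floordiv_iff_mul_le (by omega)]
      nlinarith
    have hDL : PySem.Int.floordiv N (PySem.Int.floordiv N L + 1) < L := by
      rw [PySem.Int.floordiv_lt_iff_lt_mul (by omega)]
      nlinarith
    have := loopA_phase2 L (PySem.Int.floordiv N L) (PySem.Int.mod N L) hmpos hc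
      k (L - 1) (PySem.Int.floordiv N L)
      (by omega) (by omega)
      (by rw [hsum]; omega) (by rw [hsum, hk]; omega) (by ring)
    rw [hsum] at this
    rw [this, hceil]
    norm_num

lemma step_eq (st : Int × Int) (num : Int) (h1 : 1 ≤ st.1) (h2 : 1 ≤ num) :
    stepA st num = stepB st num ∧ 1 ≤ (stepB st num).1 := by
  by_cases h : num ≤ st.1
  · refine ⟨?_, ?_⟩
    · simp [stepA, stepB, if_pos h]
    · simpa [stepB, if_pos h] using h2
  · have hlt : st.1 < num := by omega
    have hos := optimalSplit_eq num st.1 h1 hlt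
    obtain ⟨hb1, hb2⟩ :=
      (PySem.Int.neg_floordiv_neg_eq_iff_of_pos (a := num) (by omega : (0:Int) < st.1)).mp rfl
    have hppos : 0 < -(PySem.Int.floordiv (-num) st.1) := by nlinarith
    have hple : -(PySem.Int.floordiv (-num) st.1) ≤ num := by nlinarith
    have hfd1 : 1 ≤ PySem.Int.floordiv num (-(PySem.Int.floordiv (-num) st.1)) := by
      rw [PySem.Int.le_floordiv_iff_mul_le hppos]; omega
    refine ⟨?_, ?_⟩
    · simp [stepA, stepB, if_neg h, hos]
    · simpa [stepB, if_neg h] using hfd1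

lemma fold_eq (l : List Int) : ∀ (st : Int × Int),
    (1 ≤ st.1 ∨ ∀ x ∈ l, x ≤ st.1) →
    l.Pairwise (fun u v => u < v → 1 ≤ u) →
    l.foldl stepA st = l.foldl stepB st := by
  induction l with
  | nil => intro st _ _; rfl
  | cons x xs ih =>
    intro st hinv hpw
    obtain ⟨hx, hpw'⟩ := List.pairwise_cons.mp hpw
    by_cases hle : x ≤ st.1
    · -- both programs just lower the limit to x
      have hsA : stepA st x = (x, st.2) := by simp [stepA, hle]
      have hsB : stepB st x = (x, st.2) := by simp [stepB, hle]
      simp only [List.foldl_cons, hsA, hsB]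
      apply ih _ _ hpw'
      by_cases hx1 : (1:Int) ≤ x
      · exact Or.inl hx1
      · exact Or.inr (fun v hv => by have := hx v hv; omega)
    · -- a split happens; the limit must be positive here
      have h1 : 1 ≤ st.1 := by
        rcases hinv with h | h
        · exact h
        · exact absurd (h x (List.mem_cons_self ..)) hle
      obtain ⟨heq, hpos⟩ := step_eq st x h1 (by omega)
      simp only [List.foldl_cons, heq]
      exact ih _ (Or.inl hpos) hpw'

-- ===== VERDICT (by name: the statement is the Claim_ definition above) =====
theorem minimumReplacementBruteForce_spec : Claim_equal_minimumReplacementBruteForce := by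
  intro nums _ hpre
  obtain ⟨hne, hpw⟩ := hpre
  unfold Spec_minimumReplacementBruteForce minimumReplacementBruteForce minimumReplacementBruteForce_alt
  have hrev : nums.reverse ≠ [] := by simpa using hne
  obtain ⟨hd, tl, heq⟩ := List.exists_cons_of_ne_nil hrev
  have hlast : PySem.List.pyGet? nums (-1) = some hd := by
    rw [PySem.List.pyGet?_neg_one, List.getLast?_eq_head?_reverse, heq]; rfl
  rw [hlast]
  simp only [Option.getD_some]
  have hpwr : (hd :: tl).Pairwise (fun u v => u < v → 1 ≤ u) := by
    rw [← heq, List.pairwise_reverse]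
    exact hpw
  obtain ⟨hhd, hpwtl⟩ := List.pairwise_cons.mp hpwr
  rw [heq]
  simp only [List.foldl_cons]
  have hsA : stepA (hd, 0) hd = (hd, 0) := by simp [stepA]
  have hsB : stepB (hd, 0) hd = (hd, 0) := by simp [stepB]
  rw [hsA, hsB]
  have hinv : 1 ≤ hd ∨ ∀ x ∈ tl, x ≤ hd := by
    by_cases h1 : (1:Int) ≤ hd
    · exact Or.inl h1
    · exact Or.inr (fun v hv => by have := hhd v hv; omega)
  rw [fold_eq tl (hd, 0) hinv hpwtl]
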